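-- pv_equiv track=rewrite | github.com/IonutZbir/Universita | Primo Anno/Programmazione/Python/votiDizionario/es1.py | f
-- ===== SOURCE A (Python) =====
-- def f(list_string):
--     '''
--     Si scriva una funzione che prenda in input una lista di stringhe a e restituisca
--     un dizionario che abbia per chiavi le iniziali delle stringhe in a
--     e ad ogni chiave k associ come valore la lista di stringhe in a che cominciano con k
--     '''
--     output = {} # O(1)
--     for string in list_string: # O(len(list_string))
--         if string == '':
--             continue # O(1)
--         k = string[0] # O(1)
--         if k in output:  # O(1)
--                 output[k].append(string) # O(1) lettura del dizionario + O(1)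
--         else:
--             output[k] = [string] # O(1) costo per creare la lista + O(1) per scrittura del dizionario
--     return output
-- ===== SOURCE B (Python) =====
-- def f(list_string):
--     # Two-pass: collect first-occurrence key order, then build each group by filtering.
--     strings = [s for s in list_string if s != '']
--     keys = []
--     for s in strings:
--         if s[0] not in keys:
--             keys.append(s[0])
--     return {k: [s for s in strings if s[0] == k] for k in keys}
-- ===== Notes on version B (the rewrite author's own statement) =====
-- stated objective: alternative
-- what changed: A builds the dict in one pass, appending each string to its key's list; B first deduplicates the initial letters in first-occurrence order and then builds each group by an independent filter over the non-empty strings (a key-pass plus per-key scans instead of a single accumulating pass).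
import Mathlib
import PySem

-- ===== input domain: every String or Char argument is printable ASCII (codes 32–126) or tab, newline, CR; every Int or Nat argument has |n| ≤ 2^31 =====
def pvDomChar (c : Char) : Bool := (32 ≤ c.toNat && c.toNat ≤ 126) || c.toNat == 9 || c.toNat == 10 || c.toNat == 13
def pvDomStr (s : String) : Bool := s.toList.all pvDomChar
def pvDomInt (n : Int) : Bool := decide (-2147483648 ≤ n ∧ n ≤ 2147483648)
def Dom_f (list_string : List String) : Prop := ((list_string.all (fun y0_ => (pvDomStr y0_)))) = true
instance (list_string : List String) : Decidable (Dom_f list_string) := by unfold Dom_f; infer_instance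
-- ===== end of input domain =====

-- B replaces A's single accumulating dict pass by a key-dedup pass plus a per-key filter
-- (an alternative decomposition, same return value).

-- ===== PORT A =====
-- loop body of A's 'for string in list_string'
def fStep (output : PySem.Dict String (List String)) (string : String) :
    PySem.Dict String (List String) :=
  if string = "" then output                    -- continue
  else
    let k := String.ofList (string.toList.take 1)   -- string[0]; exact since string ≠ ''
    if output.contains k then
      output.insert k (output.getD k [] ++ [string])   -- output[k].append(string)
    else
      output.insert k [string]                         -- output[k] = [string]

def f (list_string : List String) : List (String × List String) :=
  (list_string.foldl fStep PySem.Dict.empty).items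

-- ===== PORT B =====
-- s[0] of a non-empty s, as a one-character string
def firstChar (s : String) : String := String.ofList (s.toList.take 1)

def f_alt (list_string : List String) : List (String × List String) :=
  let strings := list_string.filter (fun s => s ≠ "")
  let keys := strings.foldl
    (fun keys s => if firstChar s ∈ keys then keys else keys ++ [firstChar s]) []
  keys.map (fun k => (k, strings.filter (fun s => firstChar s = k)))

-- ===== PRECONDITION & SPEC =====
def Spec_f (list_string : List String) (out : List (String × List String)) : Prop := out = f_alt list_string
instance (list_string : List String) (out : List (String × List String)) : Decidable (Spec_f list_string out) := by unfold Spec_f; infer_instance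

-- ===== CLAIM (what is proved, stated in full; the proofs are below) =====
def Claim_equal_f : Prop := ∀ (list_string : List String), Dom_f list_string → Spec_f list_string (f list_string)

-- ===== LEMMAS AND PROOFS =====

-- A's loop body is a Python 'd[k] = d.get(k, []) + [string]' on the non-empty strings
theorem fStep_eq_modify (d : PySem.Dict String (List String)) (s : String) (h : s ≠ "") :
    fStep d s = d.modify (firstChar s) [] (· ++ [s]) := by
  simp only [fStep, firstChar, if_neg h, PySem.Dict.modify]
  by_cases hc : d.contains (String.ofList (s.toList.take 1))
  · simp [hc]
  · simp only [Bool.not_eq_true] at hc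
    simp [hc, PySem.Dict.getD_of_not_contains _ _ hc]

-- A's whole loop over list_string = the same modify-loop over the non-empty strings
theorem foldl_fStep_filter (l : List String) (d : PySem.Dict String (List String)) :
    l.foldl fStep d
      = (l.filter (fun s => s ≠ "")).foldl (fun d s => d.modify (firstChar s) [] (· ++ [s])) d := by
  induction l generalizing d with
  | nil => rfl
  | cons s t ih =>
    by_cases h : s = ""
    · subst h
      simpa [fStep] using ih d
    · simp [h, fStep_eq_modify d s h, ih]

theorem f_spec' (l : List String) : f l = f_alt l := by
  unfold f f_alt
  rw [foldl_fStep_filter]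
  set ss := l.filter (fun s => s ≠ "") with hss
  -- fold over strings = fold over (initial, string) pairs
  have hpair : ss.foldl (fun d s => d.modify (firstChar s) [] (· ++ [s])) PySem.Dict.empty
      = (ss.map (fun s => (firstChar s, s))).foldl
          (fun d p => d.modify p.1 [] (· ++ [p.2])) PySem.Dict.empty := by
    rw [List.foldl_map]
  rw [hpair]
  set D := (ss.map (fun s => (firstChar s, s))).foldl
      (fun d p => d.modify p.1 [] (· ++ [p.2])) PySem.Dict.empty with hD
  -- keys of D are the deduplicated initials, i.e. B's keys list
  have hkeys : D.keys = ss.foldl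
      (fun keys s => if firstChar s ∈ keys then keys else keys ++ [firstChar s]) [] := by
    rw [hD, PySem.Dict.keys_foldl_modify_key (ss.map (fun s => (firstChar s, s)))
      (fun p => p.1) [] (fun _ p => (· ++ [p.2])) PySem.Dict.empty]
    simp only [List.map_map, PySem.Dict.keys_empty, PySem.Set.update, List.foldl_map]
    simp [PySem.Set.add_eq_ite]
  -- each key's entry in D is B's filtered group
  have hgetD : ∀ k : String, D.getD k [] = ss.filter (fun s => firstChar s = k) := by
    intro k
    rw [hD, PySem.Dict.getD_foldl_modify_append]
    simp only [List.filter_map, List.map_map, Function.comp_def, PySem.Dict.getD_empty,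
      List.nil_append, List.map_id']
    exact List.filter_congr (fun (x : String) _ => Bool.beq_eq_decide_eq (firstChar x) k)
  -- D's keys are nodup, so items = keys paired with their entries
  have hnd : D.keys.Nodup := by
    rw [hD]
    exact PySem.Dict.nodup_keys_foldl_modify_key (ss.map (fun s => (firstChar s, s)))
      (fun p => p.1) [] (fun _ p => (· ++ [p.2])) PySem.Dict.empty (by simp)
  rw [PySem.Dict.items_eq_map_keys D hnd [], hkeys]
  exact List.map_congr_left (fun k _ => by rw [hgetD k])

-- ===== VERDICT (by name: the statement is the Claim_ definition above) =====
theorem f_spec : Claim_equal_f := by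
  intro l _
  unfold Spec_f
  exact f_spec' l
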